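-- pv_equiv track=rewrite | github.com/NahomyN/caseys-panel-backend | app/services/validation.py | normalize_agent_4_output
-- ===== SOURCE A (Python) =====
-- def normalize_agent_4_output(content_md: str) -> str:
--     """
--     Normalize Agent 4 (PE) output to bullet format.
--     PRODUCT.md spec: bullet-style PE with vitals; no fluff norms.
--     """
--     if not content_md.strip():
--         return "# Physical Exam\n- No physical exam documented"
--
--     lines = content_md.split('\n')
--     normalized_lines = []
--     in_pe_section = False
--
--     for line in lines:
--         stripped = line.strip()
--
--         # Preserve headers
--         if stripped.startswith('#'):
--             normalized_lines.append(line)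
--             if 'physical' in stripped.lower() or 'exam' in stripped.lower():
--                 in_pe_section = True
--             continue
--
--         # Skip empty lines
--         if not stripped:
--             normalized_lines.append(line)
--             continue
--
--         # In PE section, ensure bullet format
--         if in_pe_section and stripped:
--             # If not already a bullet or sub-bullet, make it one
--             if not stripped.startswith('-') and not stripped.startswith('  -'):
--                 # Check if it looks like a system header (HEENT:, CV:, etc.)
--                 if ':' in stripped and len(stripped.split(':')[0]) <= 10:
--                     normalized_lines.append(f"- {stripped}")
--                 else:
--                     # Regular finding, make it a bullet
--                     normalized_lines.append(f"- {stripped}")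
--             else:
--                 # Already proper format
--                 normalized_lines.append(line)
--         else:
--             normalized_lines.append(line)
--
--     return '\n'.join(normalized_lines)
-- ===== SOURCE B (Python) =====
-- def normalize_agent_4_output(content_md: str) -> str:
--     """Boundary-index + stateless map re-implementation (same output as the flag-based pass)."""
--     if not content_md.strip():
--         return "# Physical Exam\n- No physical exam documented"
--     lines = content_md.split('\n')
--     boundary = next((i for i, ln in enumerate(lines)
--                      if ln.strip().startswith('#')
--                      and ('physical' in ln.strip().lower() or 'exam' in ln.strip().lower())),
--                     None)
--
--     def emit(i, ln):
--         s = ln.strip()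
--         if boundary is None or i <= boundary or s.startswith('#') or not s or s.startswith('-'):
--             return ln
--         return f"- {s}"
--
--     return '\n'.join(emit(i, ln) for i, ln in enumerate(lines))
-- ===== Notes on version B (the rewrite author's own statement) =====
-- stated objective: simpler
-- what changed: Replaces A's stateful pass (a running in_pe_section flag mutated while appending to an accumulator, with a dead ':' system-header branch) by precomputing the index of the first physical/exam header once and then emitting every line through a single stateless per-index map.
import Mathlib
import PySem

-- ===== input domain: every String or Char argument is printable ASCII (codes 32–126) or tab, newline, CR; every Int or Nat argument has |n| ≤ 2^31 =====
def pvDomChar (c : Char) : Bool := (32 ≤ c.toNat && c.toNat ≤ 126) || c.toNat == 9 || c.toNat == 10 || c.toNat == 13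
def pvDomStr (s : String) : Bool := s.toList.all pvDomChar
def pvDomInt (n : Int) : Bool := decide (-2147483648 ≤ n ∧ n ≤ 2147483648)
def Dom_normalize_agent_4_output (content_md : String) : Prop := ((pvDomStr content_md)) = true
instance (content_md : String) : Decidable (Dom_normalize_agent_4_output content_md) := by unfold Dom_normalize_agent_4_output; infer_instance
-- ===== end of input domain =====

-- B replaces A's running in_pe_section flag by a precomputed PE-header boundary index plus a
-- stateless per-line map (objective: simpler decomposition; same output, proved below).

-- ===== PORT A =====
-- A's for-loop, step for step: state = (normalized_lines accumulator, in_pe_section flag).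
def pvAGo (ls : List String) (acc : List String) (inPe : Bool) : List String :=
  match ls with
  | [] => acc
  | line :: rest =>
    let stripped := PySem.Str.strip line
    if PySem.Str.startswith stripped "#" then
      pvAGo rest (acc ++ [line])
        (inPe || (PySem.Str.isIn "physical" (PySem.Str.lower stripped) ||
                  PySem.Str.isIn "exam" (PySem.Str.lower stripped)))
    else if stripped == "" then
      pvAGo rest (acc ++ [line]) inPe
    else if inPe && !(stripped == "") then
      if !(PySem.Str.startswith stripped "-") && !(PySem.Str.startswith stripped "  -") then
        -- stripped.split(':')[0] : split? with nonempty sep is some and never empty, so [0] = headD ""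
        if PySem.Str.isIn ":" stripped &&
           decide (PySem.Str.len ((((PySem.Str.split? stripped ":").getD []).headD "")) ≤ 10) then
          pvAGo rest (acc ++ ["- " ++ stripped]) inPe
        else
          pvAGo rest (acc ++ ["- " ++ stripped]) inPe
      else
        pvAGo rest (acc ++ [line]) inPe
    else
      pvAGo rest (acc ++ [line]) inPe

def normalize_agent_4_output (content_md : String) : String :=
  if PySem.Str.strip content_md == "" then "# Physical Exam\n- No physical exam documented"
  else
    -- content_md.split('\n'): sep ≠ "" so split? is some
    PySem.Str.join "\n" (pvAGo ((PySem.Str.split? content_md "\n").getD []) [] false)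

-- ===== PORT B =====
-- the generator-expression predicate of Source B: a header line whose text mentions physical/exam
def pvIsPEHeader (line : String) : Bool :=
  PySem.Str.startswith (PySem.Str.strip line) "#" &&
    (PySem.Str.isIn "physical" (PySem.Str.lower (PySem.Str.strip line)) ||
     PySem.Str.isIn "exam" (PySem.Str.lower (PySem.Str.strip line)))

-- Source B's emit(i, ln)
def pvEmit (boundary : Option Nat) (i : Int) (line : String) : String :=
  let s := PySem.Str.strip line
  match boundary with
  | none => line
  | some b =>
    if decide (i ≤ (b : Int)) || PySem.Str.startswith s "#" || (s == "") ||
       PySem.Str.startswith s "-" then line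
    else "- " ++ s

def normalize_agent_4_output_alt (content_md : String) : String :=
  if PySem.Str.strip content_md == "" then "# Physical Exam\n- No physical exam documented"
  else
    PySem.Str.join "\n"
      ((PySem.List.enumerate ((PySem.Str.split? content_md "\n").getD [])).map
        (fun p => pvEmit (((PySem.Str.split? content_md "\n").getD []).findIdx? pvIsPEHeader) p.1 p.2))

-- ===== PRECONDITION & SPEC =====
def Spec_normalize_agent_4_output (content_md : String) (out : String) : Prop := out = normalize_agent_4_output_alt content_md
instance (content_md : String) (out : String) : Decidable (Spec_normalize_agent_4_output content_md out) := by unfold Spec_normalize_agent_4_output; infer_instance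

-- ===== CLAIM (what is proved, stated in full; the proofs are below) =====
def Claim_equal_normalize_agent_4_output : Prop := ∀ (content_md : String), Dom_normalize_agent_4_output content_md → Spec_normalize_agent_4_output content_md (normalize_agent_4_output content_md)

-- ===== LEMMAS AND PROOFS =====

-- the in-PE-section transform both programs apply beyond the boundary
def pvEmitIn (line : String) : String :=
  if PySem.Str.startswith (PySem.Str.strip line) "#" || (PySem.Str.strip line == "") ||
     PySem.Str.startswith (PySem.Str.strip line) "-" then line
  else "- " ++ PySem.Str.strip line

theorem pv_dropWhile_head {α : Type} (p : α → Bool) (l : List α) (c : α) (r : List α)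
    (h : l.dropWhile p = c :: r) : p c = false := by
  induction l with
  | nil => simp [List.dropWhile] at h
  | cons a t ih =>
    by_cases hp : p a = true
    · rw [List.dropWhile_cons_of_pos hp] at h; exact ih h
    · rw [List.dropWhile_cons_of_neg hp] at h
      cases h; simpa using hp

theorem pv_strip_head_not_space (l : List Char) (c : Char) (r : List Char)
    (h : PySem.Chars.strip l = c :: r) : PySem.Chars.isspace c = false := by
  unfold PySem.Chars.strip PySem.Chars.rstrip at h
  have hpre : c :: r <+: PySem.Chars.lstrip l := by
    rw [← h]
    have := List.dropWhile_suffix (l := (PySem.Chars.lstrip l).reverse) (p := PySem.Chars.isspace)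
    exact List.reverse_suffix.mp (by simpa using this)
  obtain ⟨t, ht⟩ := hpre
  unfold PySem.Chars.lstrip at ht
  exact pv_dropWhile_head _ _ _ _ ht.symm

theorem pv_strip_startswith_space (line : String) :
    PySem.Str.startswith (PySem.Str.strip line) "  -" = false := by
  rw [PySem.Str.startswith_eq, PySem.Str.toList_strip]
  cases h : PySem.Chars.strip line.toList with
  | nil =>
    apply Bool.eq_false_iff.mpr
    intro hT
    unfold PySem.Chars.startswith at hT
    rw [List.isPrefixOf_iff_prefix] at hT
    have := List.eq_nil_of_prefix_nil hT
    simp at this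
  | cons c r =>
    have hc := pv_strip_head_not_space _ _ _ h
    apply Bool.eq_false_iff.mpr
    intro hT
    unfold PySem.Chars.startswith at hT
    rw [List.isPrefixOf_iff_prefix] at hT
    rw [show ("  -".toList) = [' ', ' ', '-'] from rfl] at hT
    rw [List.cons_prefix_cons] at hT
    rw [← hT.1] at hc
    exact absurd hc (by decide)

theorem pvAGo_append (ls : List String) (acc : List String) (inPe : Bool) :
    pvAGo ls acc inPe = acc ++ pvAGo ls [] inPe := by
  induction ls generalizing acc inPe with
  | nil => simp [pvAGo]
  | cons line rest ih =>
    simp only [pvAGo]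
    split_ifs <;>
      (conv_lhs => rw [ih]) <;> (conv_rhs => rw [ih]) <;>
        simp only [List.nil_append, List.append_assoc]

theorem pvEmitIn_header (line : String)
    (h1 : PySem.Str.startswith (PySem.Str.strip line) "#" = true) : pvEmitIn line = line := by
  unfold pvEmitIn
  rw [h1]; simp

theorem pvEmitIn_empty (line : String)
    (h1 : PySem.Str.startswith (PySem.Str.strip line) "#" = false)
    (h2 : (PySem.Str.strip line == "") = true) : pvEmitIn line = line := by
  unfold pvEmitIn
  rw [h1, h2]; simp

theorem pvEmitIn_bullet (line : String)
    (h1 : PySem.Str.startswith (PySem.Str.strip line) "#" = false)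
    (h2 : (PySem.Str.strip line == "") = false)
    (h3 : PySem.Str.startswith (PySem.Str.strip line) "-" = true) : pvEmitIn line = line := by
  unfold pvEmitIn
  rw [h1, h2, h3]; simp

theorem pvEmitIn_plain (line : String)
    (h1 : PySem.Str.startswith (PySem.Str.strip line) "#" = false)
    (h2 : (PySem.Str.strip line == "") = false)
    (h3 : PySem.Str.startswith (PySem.Str.strip line) "-" = false) :
    pvEmitIn line = "- " ++ PySem.Str.strip line := by
  unfold pvEmitIn
  rw [h1, h2, h3]; simp

set_option maxHeartbeats 1000000 in
theorem pvAGo_true (ls : List String) : pvAGo ls [] true = ls.map pvEmitIn := by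
  induction ls with
  | nil => simp [pvAGo]
  | cons line rest ih =>
    simp only [pvAGo, List.map_cons]
    by_cases h1 : PySem.Str.startswith (PySem.Str.strip line) "#" = true
    · rw [if_pos h1, Bool.true_or, pvAGo_append, ih, pvEmitIn_header line h1]
      rfl
    · have h1' : PySem.Str.startswith (PySem.Str.strip line) "#" = false :=
        Bool.eq_false_iff.mpr h1
      rw [if_neg h1]
      by_cases h2 : (PySem.Str.strip line == "") = true
      · rw [if_pos h2, pvAGo_append, ih, pvEmitIn_empty line h1' h2]
        rfl
      · have h2' : (PySem.Str.strip line == "") = false := Bool.eq_false_iff.mpr h2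
        rw [if_neg h2, if_pos (show (true && !(PySem.Str.strip line == "")) = true by
          rw [h2']; rfl)]
        by_cases h3 : PySem.Str.startswith (PySem.Str.strip line) "-" = true
        · rw [if_neg (show ¬((!PySem.Str.startswith (PySem.Str.strip line) "-" &&
              !PySem.Str.startswith (PySem.Str.strip line) "  -") = true) by
              rw [h3]; simp)]
          rw [pvAGo_append, ih, pvEmitIn_bullet line h1' h2' h3]
          rfl
        · have h3' : PySem.Str.startswith (PySem.Str.strip line) "-" = false :=
            Bool.eq_false_iff.mpr h3
          rw [if_pos (show (!PySem.Str.startswith (PySem.Str.strip line) "-" &&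
              !PySem.Str.startswith (PySem.Str.strip line) "  -") = true by
              rw [h3', pv_strip_startswith_space]; rfl)]
          rw [ite_self, pvAGo_append, ih, pvEmitIn_plain line h1' h2' h3']
          rfl

set_option maxHeartbeats 1000000 in
theorem pvAGo_skip (line : String) (rest : List String)
    (h : pvIsPEHeader line = false) :
    pvAGo (line :: rest) [] false = line :: pvAGo rest [] false := by
  simp only [pvAGo]
  by_cases h1 : PySem.Str.startswith (PySem.Str.strip line) "#" = true
  · have hkw : (PySem.Str.isIn "physical" (PySem.Str.lower (PySem.Str.strip line)) ||
        PySem.Str.isIn "exam" (PySem.Str.lower (PySem.Str.strip line))) = false := by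
      unfold pvIsPEHeader at h
      rw [h1, Bool.true_and] at h
      exact h
    rw [if_pos h1, hkw, Bool.or_false, pvAGo_append]
    rfl
  · rw [if_neg h1]
    by_cases h2 : (PySem.Str.strip line == "") = true
    · rw [if_pos h2, pvAGo_append]; rfl
    · rw [if_neg h2, if_neg (show ¬((false && !(PySem.Str.strip line == "")) = true) by simp)]
      rw [pvAGo_append]; rfl

set_option maxHeartbeats 1000000 in
theorem pvAGo_hit (line : String) (rest : List String)
    (h : pvIsPEHeader line = true) :
    pvAGo (line :: rest) [] false = line :: pvAGo rest [] true := by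
  unfold pvIsPEHeader at h
  obtain ⟨h1, hkw⟩ := Bool.and_eq_true _ _ |>.mp h
  simp only [pvAGo]
  rw [if_pos h1, hkw, Bool.or_true, pvAGo_append]
  rfl

set_option maxHeartbeats 1000000 in
theorem pvAGo_main (ls : List String) :
    pvAGo ls [] false =
      match ls.findIdx? pvIsPEHeader with
      | none => ls
      | some b => ls.take (b + 1) ++ (ls.drop (b + 1)).map pvEmitIn := by
  induction ls with
  | nil => simp [pvAGo]
  | cons line rest ih =>
    by_cases hp : pvIsPEHeader line = true
    · rw [pvAGo_hit line rest hp, pvAGo_true, List.findIdx?_cons, if_pos hp]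
      simp
    · have hp' : pvIsPEHeader line = false := Bool.eq_false_iff.mpr hp
      rw [pvAGo_skip line rest hp', ih, List.findIdx?_cons, if_neg (by rw [hp']; simp)]
      cases hfr : rest.findIdx? pvIsPEHeader with
      | none => simp
      | some b => simp [List.take_succ_cons, List.drop_succ_cons]

theorem pvEmit_none (i : Int) (line : String) : pvEmit none i line = line := rfl

theorem pvEmit_le (b : Nat) (i : Int) (hi : i ≤ (b : Int)) (line : String) :
    pvEmit (some b) i line = line := by
  simp only [pvEmit]
  rw [decide_eq_true hi]; simp

theorem pvEmit_gt (b : Nat) (i : Int) (hi : ¬ i ≤ (b : Int)) (line : String) :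
    pvEmit (some b) i line = pvEmitIn line := by
  simp only [pvEmit, pvEmitIn]
  rw [decide_eq_false hi, Bool.false_or]

theorem pvMapB_none (ls : List String) (i0 : Int) :
    (PySem.List.enumerate ls i0).map (fun p => pvEmit none p.1 p.2) = ls := by
  induction ls generalizing i0 with
  | nil => simp [PySem.List.enumerate_nil]
  | cons l rest ih =>
    rw [PySem.List.enumerate_cons]
    simp only [List.map_cons]
    rw [pvEmit_none, ih]

theorem pvMapB_in (ls : List String) (b : Nat) (i0 : Int) (h : (b : Int) < i0) :
    (PySem.List.enumerate ls i0).map (fun p => pvEmit (some b) p.1 p.2) = ls.map pvEmitIn := by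
  induction ls generalizing i0 with
  | nil => simp [PySem.List.enumerate_nil]
  | cons l rest ih =>
    rw [PySem.List.enumerate_cons]
    simp only [List.map_cons]
    rw [pvEmit_gt b i0 (by omega), ih (i0 + 1) (by omega)]

theorem pvMapB_le (ls : List String) (b i0 : Nat) (h : i0 ≤ b) :
    (PySem.List.enumerate ls (i0 : Int)).map (fun p => pvEmit (some b) p.1 p.2) =
      ls.take (b + 1 - i0) ++ (ls.drop (b + 1 - i0)).map pvEmitIn := by
  induction ls generalizing i0 with
  | nil => simp [PySem.List.enumerate_nil]
  | cons l rest ih =>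
    rw [PySem.List.enumerate_cons]
    simp only [List.map_cons]
    rw [pvEmit_le b (i0 : Int) (by exact_mod_cast h) l]
    by_cases h2 : i0 + 1 ≤ b
    · have hcast : ((i0 : Int) + 1) = ((i0 + 1 : Nat) : Int) := by push_cast; ring
      rw [hcast, ih (i0 + 1) h2]
      have e1 : b + 1 - i0 = (b + 1 - (i0 + 1)) + 1 := by omega
      rw [e1, List.take_succ_cons, List.drop_succ_cons, List.cons_append]
    · have hgt : (b : Int) < (i0 : Int) + 1 := by
        have : i0 = b := by omega
        omega
      rw [pvMapB_in rest b _ hgt]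
      have e1 : b + 1 - i0 = 1 := by omega
      rw [e1]
      rfl

-- ===== VERDICT (by name: the statement is the Claim_ definition above) =====
set_option maxHeartbeats 1000000 in
theorem normalize_agent_4_output_spec : Claim_equal_normalize_agent_4_output := by
  unfold Claim_equal_normalize_agent_4_output
  intro content_md _
  unfold Spec_normalize_agent_4_output normalize_agent_4_output normalize_agent_4_output_alt
  by_cases h : (PySem.Str.strip content_md == "") = true
  · rw [if_pos h, if_pos h]
  · rw [if_neg h, if_neg h]
    congr 1
    rw [pvAGo_main]
    cases hb : ((PySem.Str.split? content_md "\n").getD []).findIdx? pvIsPEHeader with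
    | none => exact (pvMapB_none _ 0).symm
    | some b =>
      have := pvMapB_le ((PySem.Str.split? content_md "\n").getD []) b 0 (Nat.zero_le b)
      rw [Nat.cast_zero, Nat.sub_zero] at this
      exact this.symm
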